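-- pv_equiv track=rewrite | github.com/chuanqixu/anki-quick-ai | add-on/utils.py | format_prompt_list
-- ===== SOURCE A (Python) =====
-- def format_prompt_list(prompt_list, placeholder_dict, language_list=None):
--     promp_index_placeholder_value_dict = {}
--     for placeholder, promp_index_value_dict in placeholder_dict.items():
--         for index, value in promp_index_value_dict.items():
--             index = int(index)
--             if index in promp_index_placeholder_value_dict:
--                 promp_index_placeholder_value_dict[index][placeholder] = value
--             else:
--                 promp_index_placeholder_value_dict[index] = {placeholder: value}
--
--     formatted_prompt_list = []
--     for index, prompt in enumerate(prompt_list):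
--         if index in promp_index_placeholder_value_dict:
--             for key, value in promp_index_placeholder_value_dict[index].items():
--                 prompt = prompt.replace(f"#{key}#", value)
--         if language_list:
--             prompt = prompt.replace(f"#language#", language_list[index])
--         formatted_prompt_list.append(prompt)
--     return formatted_prompt_list
-- ===== SOURCE B (Python) =====
-- def format_prompt_list(prompt_list, placeholder_dict, language_list=None):
--     formatted_prompt_list = []
--     for i, prompt in enumerate(prompt_list):
--         for placeholder, index_value_dict in placeholder_dict.items():
--             for index, value in index_value_dict.items():
--                 if int(index) == i:
--                     prompt = prompt.replace(f"#{placeholder}#", value)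
--         if language_list:
--             prompt = prompt.replace("#language#", language_list[i])
--         formatted_prompt_list.append(prompt)
--     return formatted_prompt_list
-- ===== Notes on version B (the rewrite author's own statement) =====
-- stated objective: simpler
-- what changed: Drops A's intermediate index->(placeholder->value) transpose dict entirely: B enumerates the prompts and, for each prompt index i, scans placeholder_dict directly, applying each replacement whose int(index) equals i, then the #language# replacement.
-- outside the precondition, e.g. on format_prompt_list(['a #x#'], {'x': {'0': '1', '+0': '2'}}, None): A returns ['a 2'], B returns ['a 1']
import Mathlib
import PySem

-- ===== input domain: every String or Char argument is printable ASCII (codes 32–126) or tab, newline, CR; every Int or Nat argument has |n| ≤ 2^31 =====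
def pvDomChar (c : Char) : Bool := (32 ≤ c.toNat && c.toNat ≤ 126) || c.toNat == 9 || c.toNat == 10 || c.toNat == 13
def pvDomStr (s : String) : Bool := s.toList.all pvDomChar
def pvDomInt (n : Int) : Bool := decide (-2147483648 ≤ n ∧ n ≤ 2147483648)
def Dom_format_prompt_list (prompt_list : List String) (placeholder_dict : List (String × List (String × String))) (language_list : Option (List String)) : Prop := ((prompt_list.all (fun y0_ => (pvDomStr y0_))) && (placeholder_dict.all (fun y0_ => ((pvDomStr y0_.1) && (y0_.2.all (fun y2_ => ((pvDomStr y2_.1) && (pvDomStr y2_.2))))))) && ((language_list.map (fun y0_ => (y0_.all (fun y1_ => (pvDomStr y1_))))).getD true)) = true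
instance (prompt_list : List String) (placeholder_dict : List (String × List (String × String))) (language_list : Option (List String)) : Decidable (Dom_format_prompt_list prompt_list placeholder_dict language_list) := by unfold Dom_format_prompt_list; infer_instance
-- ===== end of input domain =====

-- B drops A's intermediate index->(placeholder->value) transpose dict and instead scans
-- placeholder_dict directly for each prompt index (objective: simpler; same results on Pre_).

-- shared by both ports: the identical final  if language_list: prompt.replace("#language#", language_list[index])  step
def pvLang (language_list : Option (List String)) (i : Int) (prompt : String) : String :=
  match language_list with
  | none => prompt
  | some l =>
    if l.isEmpty then prompt
    else
      match PySem.List.pyGet? l i with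
      | some lang => PySem.Str.replace prompt "#language#" lang
      | none => prompt  -- here Python raises IndexError; Pre_ excludes these inputs

-- ===== PORT A =====
-- one body of A's nested table-building loop: index = int(index); insert/overwrite table[index][placeholder]
def pvStepA (ph : String) (t : PySem.Dict Int (PySem.Dict String String)) (kv : String × String) :
    PySem.Dict Int (PySem.Dict String String) :=
  match PySem.Int.ofStr? kv.1 with
  | none => t  -- here Python's int(index) raises ValueError; Pre_ excludes these inputs
  | some index =>
    if t.contains index then
      t.insert index ((t.getD index PySem.Dict.empty).insert ph kv.2)
    else
      t.insert index (PySem.Dict.empty.insert ph kv.2)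

-- promp_index_placeholder_value_dict of A
def pvTableA (placeholder_dict : List (String × List (String × String))) :
    PySem.Dict Int (PySem.Dict String String) :=
  placeholder_dict.foldl (fun t pr => pr.2.foldl (pvStepA pr.1) t) PySem.Dict.empty

-- loop body of A's second loop: substitutions for prompt index ip.1, then the language step
def pvPromptA (placeholder_dict : List (String × List (String × String))) (language_list : Option (List String)) (ip : Int × String) : String :=
  pvLang language_list ip.1
    (if (pvTableA placeholder_dict).contains ip.1 then
      ((pvTableA placeholder_dict).getD ip.1 PySem.Dict.empty).items.foldl
        (fun p kv => PySem.Str.replace p ("#" ++ kv.1 ++ "#") kv.2) ip.2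
    else ip.2)

def format_prompt_list (prompt_list : List String) (placeholder_dict : List (String × List (String × String))) (language_list : Option (List String)) : List String :=
  (PySem.List.enumerate prompt_list).foldl (fun acc ip =>
    acc ++ [pvPromptA placeholder_dict language_list ip]) []

-- ===== PORT B =====
def format_prompt_list_alt (prompt_list : List String) (placeholder_dict : List (String × List (String × String))) (language_list : Option (List String)) : List String :=
  (PySem.List.enumerate prompt_list).map (fun ip =>
    pvLang language_list ip.1
      (placeholder_dict.foldl (fun prompt pr =>
        pr.2.foldl (fun prompt kv =>
          if PySem.Int.ofStr? kv.1 = some ip.1 then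
            PySem.Str.replace prompt ("#" ++ pr.1 ++ "#") kv.2
          else prompt) prompt) ip.2))

-- ===== PRECONDITION & SPEC =====
-- Pre_ excludes (a) inputs where A raises: an index key int() cannot parse (ValueError), or a
-- non-empty language_list shorter than prompt_list (IndexError); (b) two index keys of one
-- placeholder parsing to the same int — there A's dict overwrite keeps only the last value, an
-- artefact of the transpose (see claim cites); (c) duplicate placeholder names, which cannot
-- occur in a real Python dict.
def Pre_format_prompt_list (prompt_list : List String) (placeholder_dict : List (String × List (String × String))) (language_list : Option (List String)) : Prop :=
  ((placeholder_dict.all (fun pr =>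
      pr.2.all (fun kv => (PySem.Int.ofStr? kv.1).isSome)
      && decide ((pr.2.map (fun kv => PySem.Int.ofStr? kv.1)).Nodup)))
   && decide ((placeholder_dict.map Prod.fst).Nodup)
   && (match language_list with
       | none => true
       | some l => l.isEmpty || decide (prompt_list.length ≤ l.length))) = true
instance (prompt_list : List String) (placeholder_dict : List (String × List (String × String))) (language_list : Option (List String)) : Decidable (Pre_format_prompt_list prompt_list placeholder_dict language_list) := by unfold Pre_format_prompt_list; infer_instance

def pvWitness_format_prompt_list : List String × (List (String × List (String × String))) × Option (List String) :=
  (["hello #x#"], [("x", [("0", "world")])], some ["en"])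

def Spec_format_prompt_list (prompt_list : List String) (placeholder_dict : List (String × List (String × String))) (language_list : Option (List String)) (out : List String) : Prop := out = format_prompt_list_alt prompt_list placeholder_dict language_list
instance (prompt_list : List String) (placeholder_dict : List (String × List (String × String))) (language_list : Option (List String)) (out : List String) : Decidable (Spec_format_prompt_list prompt_list placeholder_dict language_list out) := by unfold Spec_format_prompt_list; infer_instance

-- ===== CLAIM (what is proved, stated in full; the proofs are below) =====
def Claim_equal_format_prompt_list : Prop := ∀ (prompt_list : List String) (placeholder_dict : List (String × List (String × String))) (language_list : Option (List String)), Dom_format_prompt_list prompt_list placeholder_dict language_list → Pre_format_prompt_list prompt_list placeholder_dict language_list → Spec_format_prompt_list prompt_list placeholder_dict language_list (format_prompt_list prompt_list placeholder_dict language_list)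

-- ===== LEMMAS AND PROOFS =====

-- value applied at prompt index i by one placeholder's {index: value} dict (unique under Pre_)
def pvSelB (i : Int) (inner : List (String × String)) : Option String :=
  (inner.find? (fun kv => PySem.Int.ofStr? kv.1 == some i)).map (·.2)

-- the (placeholder, value) replacements applied to prompt i, in placeholder_dict order
def pvSel (pd : List (String × List (String × String))) (i : Int) : List (String × String) :=
  pd.filterMap (fun pr => (pvSelB i pr.2).map (fun v => (pr.1, v)))

def pvOpt (ph : String) (o : Option String) : List (String × String) :=
  match o with
  | some v => [(ph, v)]
  | none => []

theorem pvStepA_untouched (ph : String) (i : Int) (inner : List (String × String))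
    (t : PySem.Dict Int (PySem.Dict String String))
    (h : ∀ kv ∈ inner, PySem.Int.ofStr? kv.1 ≠ some i) :
    (inner.foldl (pvStepA ph) t).getD i PySem.Dict.empty = t.getD i PySem.Dict.empty := by
  induction inner generalizing t with
  | nil => rfl
  | cons kv rest ih =>
    have hkv := h kv (List.mem_cons_self)
    simp only [List.foldl_cons]
    rw [ih _ (fun x hx => h x (List.mem_cons_of_mem _ hx))]
    cases hj : PySem.Int.ofStr? kv.1 with
    | none => simp [pvStepA, hj]
    | some j =>
      have hne : i ≠ j := by rw [hj] at hkv; exact fun e => hkv (by rw [e])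
      simp only [pvStepA, hj]
      split <;> exact PySem.Dict.getD_insert_of_ne _ _ _ hne

theorem pvInner_items (ph : String) (i : Int) (inner : List (String × String))
    (t : PySem.Dict Int (PySem.Dict String String))
    (hs : ∀ kv ∈ inner, (PySem.Int.ofStr? kv.1).isSome)
    (hnd : (inner.map (fun kv => PySem.Int.ofStr? kv.1)).Nodup)
    (hfresh : ph ∉ ((t.getD i PySem.Dict.empty).items.map Prod.fst)) :
    ((inner.foldl (pvStepA ph) t).getD i PySem.Dict.empty).items
      = (t.getD i PySem.Dict.empty).items ++ pvOpt ph (pvSelB i inner) := by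
  induction inner generalizing t with
  | nil => simp [pvSelB, pvOpt]
  | cons kv rest ih =>
    obtain ⟨j, hj⟩ := Option.isSome_iff_exists.mp (hs kv List.mem_cons_self)
    simp only [List.map_cons, List.nodup_cons] at hnd
    simp only [List.foldl_cons]
    by_cases hji : j = i
    · subst hji
      have hrest : ∀ kv' ∈ rest, PySem.Int.ofStr? kv'.1 ≠ some j := by
        intro kv' h' e
        exact hnd.1 (by rw [← hj, ← e] at *; exact List.mem_map_of_mem h')
      rw [pvStepA_untouched _ _ _ _ hrest]
      have hsel : pvSelB j (kv :: rest) = some kv.2 := by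
        simp [pvSelB, hj]
      rw [hsel]
      simp only [pvStepA, hj]
      by_cases hc : t.contains j = true
      · rw [if_pos hc, PySem.Dict.getD_insert_self]
        have hph : (t.getD j PySem.Dict.empty).contains ph = false := by
          rw [← Bool.not_eq_true]
          exact fun h2 => hfresh (by
            simpa [PySem.Dict.keys] using (PySem.Dict.contains_iff_mem_keys _ _).mp h2)
        rw [PySem.Dict.items_insert_of_not_contains _ _ hph]
        rfl
      · rw [if_neg hc, PySem.Dict.getD_insert_self,
            PySem.Dict.getD_of_not_contains _ _ (Bool.not_eq_true _ ▸ eq_false_of_ne_true hc)]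
        rfl
    · have hij : i ≠ j := fun e => hji e.symm
      have hgd : (pvStepA ph t kv).getD i PySem.Dict.empty = t.getD i PySem.Dict.empty := by
        simp only [pvStepA, hj]
        split <;> exact PySem.Dict.getD_insert_of_ne _ _ _ hij
      have hsel : pvSelB i (kv :: rest) = pvSelB i rest := by
        simp [pvSelB, hj, hji]
      rw [hsel, ih _ (fun x hx => hs x (List.mem_cons_of_mem _ hx)) hnd.2 (hgd ▸ hfresh), hgd]

theorem pvTable_items (pd : List (String × List (String × String)))
    (t : PySem.Dict Int (PySem.Dict String String)) (i : Int)
    (hs : ∀ pr ∈ pd, ∀ kv ∈ pr.2, (PySem.Int.ofStr? kv.1).isSome)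
    (hnd : ∀ pr ∈ pd, (pr.2.map (fun kv => PySem.Int.ofStr? kv.1)).Nodup)
    (hout : (pd.map Prod.fst).Nodup)
    (hfresh : ∀ pr ∈ pd, ∀ j, pr.1 ∉ (((t.getD j PySem.Dict.empty)).items.map Prod.fst)) :
    ((pd.foldl (fun t pr => pr.2.foldl (pvStepA pr.1) t) t).getD i PySem.Dict.empty).items
      = (t.getD i PySem.Dict.empty).items ++ pvSel pd i := by
  induction pd generalizing t with
  | nil => simp [pvSel]
  | cons pr rest ih =>
    simp only [List.foldl_cons]
    simp only [List.map_cons, List.nodup_cons] at hout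
    have ht' : ∀ j, ((pr.2.foldl (pvStepA pr.1) t).getD j PySem.Dict.empty).items
        = (t.getD j PySem.Dict.empty).items ++ pvOpt pr.1 (pvSelB j pr.2) :=
      fun j => pvInner_items pr.1 j pr.2 t (hs pr List.mem_cons_self)
        (hnd pr List.mem_cons_self) (hfresh pr List.mem_cons_self j)
    have hfresh' : ∀ q ∈ rest, ∀ j,
        q.1 ∉ (((pr.2.foldl (pvStepA pr.1) t).getD j PySem.Dict.empty).items.map Prod.fst) := by
      intro q hq j hm
      rw [ht' j] at hm
      simp only [List.map_append, List.mem_append] at hm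
      rcases hm with hm | hm
      · exact hfresh q (List.mem_cons_of_mem _ hq) j hm
      · have hq1 : q.1 = pr.1 := by
          cases hsb : pvSelB j pr.2
          · rw [hsb] at hm; simp [pvOpt] at hm
          · rw [hsb] at hm; simpa [pvOpt] using hm
        exact hout.1 (hq1 ▸ List.mem_map_of_mem hq)
    rw [ih _ (fun x hx => hs x (List.mem_cons_of_mem _ hx))
          (fun x hx => hnd x (List.mem_cons_of_mem _ hx)) hout.2 hfresh',
        ht' i, List.append_assoc]
    congr 1
    cases hsb : pvSelB i pr.2 <;> simp [pvSel, pvOpt, hsb]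

theorem pvB_inner_nomatch (ph : String) (i : Int) (inner : List (String × String)) (p : String)
    (h : ∀ kv ∈ inner, PySem.Int.ofStr? kv.1 ≠ some i) :
    inner.foldl (fun prompt kv =>
      if PySem.Int.ofStr? kv.1 = some i then
        PySem.Str.replace prompt ("#" ++ ph ++ "#") kv.2
      else prompt) p = p := by
  induction inner with
  | nil => rfl
  | cons kv rest ih =>
    simp only [List.foldl_cons, if_neg (h kv (List.mem_cons_self))]
    exact ih (fun x hx => h x (List.mem_cons_of_mem _ hx))

theorem pvB_inner (ph : String) (i : Int) (inner : List (String × String)) (p : String)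
    (hs : ∀ kv ∈ inner, (PySem.Int.ofStr? kv.1).isSome)
    (hnd : (inner.map (fun kv => PySem.Int.ofStr? kv.1)).Nodup) :
    inner.foldl (fun prompt kv =>
      if PySem.Int.ofStr? kv.1 = some i then
        PySem.Str.replace prompt ("#" ++ ph ++ "#") kv.2
      else prompt) p
    = (pvOpt ph (pvSelB i inner)).foldl
        (fun p kv => PySem.Str.replace p ("#" ++ kv.1 ++ "#") kv.2) p := by
  induction inner generalizing p with
  | nil => simp [pvSelB, pvOpt]
  | cons kv rest ih =>
    obtain ⟨j, hj⟩ := Option.isSome_iff_exists.mp (hs kv List.mem_cons_self)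
    simp only [List.map_cons, List.nodup_cons] at hnd
    simp only [List.foldl_cons]
    by_cases hji : j = i
    · subst hji
      rw [if_pos hj]
      have hrest : ∀ kv' ∈ rest, PySem.Int.ofStr? kv'.1 ≠ some j := by
        intro kv' h' e
        exact hnd.1 (by rw [← hj, ← e] at *; exact List.mem_map_of_mem h')
      rw [pvB_inner_nomatch ph j rest _ hrest]
      have hsel : pvSelB j (kv :: rest) = some kv.2 := by simp [pvSelB, hj]
      rw [hsel]
      rfl
    · rw [if_neg (by rw [hj]; exact fun e => hji (Option.some.inj e))]
      have hsel : pvSelB i (kv :: rest) = pvSelB i rest := by simp [pvSelB, hj, hji]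
      rw [hsel, ih _ (fun x hx => hs x (List.mem_cons_of_mem _ hx)) hnd.2]

theorem pvB_outer (pd : List (String × List (String × String))) (i : Int) (p : String)
    (hs : ∀ pr ∈ pd, ∀ kv ∈ pr.2, (PySem.Int.ofStr? kv.1).isSome)
    (hnd : ∀ pr ∈ pd, (pr.2.map (fun kv => PySem.Int.ofStr? kv.1)).Nodup) :
    pd.foldl (fun prompt pr =>
      pr.2.foldl (fun prompt kv =>
        if PySem.Int.ofStr? kv.1 = some i then
          PySem.Str.replace prompt ("#" ++ pr.1 ++ "#") kv.2
        else prompt) prompt) p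
    = (pvSel pd i).foldl (fun p kv => PySem.Str.replace p ("#" ++ kv.1 ++ "#") kv.2) p := by
  induction pd generalizing p with
  | nil => simp [pvSel]
  | cons pr rest ih =>
    simp only [List.foldl_cons]
    rw [pvB_inner pr.1 i pr.2 p (hs pr List.mem_cons_self) (hnd pr List.mem_cons_self)]
    rw [ih _ (fun x hx => hs x (List.mem_cons_of_mem _ hx))
          (fun x hx => hnd x (List.mem_cons_of_mem _ hx))]
    have hcons : pvSel (pr :: rest) i = pvOpt pr.1 (pvSelB i pr.2) ++ pvSel rest i := by
      cases hsb : pvSelB i pr.2 <;> simp [pvSel, pvOpt, hsb]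
    rw [hcons, List.foldl_append]

theorem pvA_prompt (pd : List (String × List (String × String))) (i : Int) (p : String)
    (hs : ∀ pr ∈ pd, ∀ kv ∈ pr.2, (PySem.Int.ofStr? kv.1).isSome)
    (hnd : ∀ pr ∈ pd, (pr.2.map (fun kv => PySem.Int.ofStr? kv.1)).Nodup)
    (hout : (pd.map Prod.fst).Nodup) :
    (if (pvTableA pd).contains i then
      ((pvTableA pd).getD i PySem.Dict.empty).items.foldl
        (fun p kv => PySem.Str.replace p ("#" ++ kv.1 ++ "#") kv.2) p
    else p)
    = (pvSel pd i).foldl (fun p kv => PySem.Str.replace p ("#" ++ kv.1 ++ "#") kv.2) p := by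
  have htab := pvTable_items pd PySem.Dict.empty i hs hnd hout
    (by intro pr _ j; simp [PySem.Dict.getD_empty,
      show (PySem.Dict.empty : PySem.Dict String String).items = [] from rfl])
  simp only [PySem.Dict.getD_empty] at htab
  by_cases hc : (pvTableA pd).contains i = true
  · rw [if_pos hc]
    rw [show pvTableA pd = pd.foldl (fun t pr => pr.2.foldl (pvStepA pr.1) t) PySem.Dict.empty from rfl,
        htab]
    simp only [show (PySem.Dict.empty : PySem.Dict String String).items = [] from rfl,
      List.nil_append]
  · rw [if_neg hc]
    have hg : (pvTableA pd).getD i PySem.Dict.empty = PySem.Dict.empty :=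
      PySem.Dict.getD_of_not_contains _ _ (eq_false_of_ne_true hc)
    have hsel : pvSel pd i = [] := by
      have := htab
      rw [show (pd.foldl (fun t pr => pr.2.foldl (pvStepA pr.1) t) PySem.Dict.empty) = pvTableA pd from rfl,
          hg] at this
      simpa [show (PySem.Dict.empty : PySem.Dict String String).items = [] from rfl] using this.symm
    rw [hsel]
    rfl

-- ===== VERDICT (by name: the statement is the Claim_ definition above) =====
set_option maxHeartbeats 1000000 in
theorem format_prompt_list_spec : Claim_equal_format_prompt_list := by
  intro prompt_list placeholder_dict language_list _ hpre
  unfold Pre_format_prompt_list at hpre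
  simp only [Bool.and_eq_true, List.all_eq_true, decide_eq_true_eq] at hpre
  obtain ⟨⟨hin, hout⟩, _⟩ := hpre
  have hs : ∀ pr ∈ placeholder_dict, ∀ kv ∈ pr.2, (PySem.Int.ofStr? kv.1).isSome = true :=
    fun pr hpr kv hkv => (hin pr hpr).1 kv hkv
  have hnd : ∀ pr ∈ placeholder_dict, (pr.2.map (fun kv => PySem.Int.ofStr? kv.1)).Nodup :=
    fun pr hpr => (hin pr hpr).2
  unfold Spec_format_prompt_list format_prompt_list format_prompt_list_alt
  refine (PySem.List.foldl_append_singleton_eq_map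
        (pvPromptA placeholder_dict language_list)
        (PySem.List.enumerate prompt_list) []).trans ?_
  rw [List.nil_append]
  refine List.map_congr_left (fun ip _ => ?_)
  unfold pvPromptA
  exact congrArg (pvLang language_list ip.1)
    ((pvA_prompt placeholder_dict ip.1 ip.2 hs hnd hout).trans
      (pvB_outer placeholder_dict ip.1 ip.2 hs hnd).symm)
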